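-- pv_equiv track=rewrite | github.com/nielsvaes/maya_utils | general.py | get_namespace
-- ===== SOURCE A (Python) =====
-- def get_namespace(object_name):
--     """
--     Returns the namespace from a string
--
--     :param object_name: *string*
--     :return:
--     """
--
--     parts = object_name.split("|")
--     result = ""
--
--     for index, part in enumerate(parts):
--         if index > 0:
--             result += "|"
--         result += part.split(":")[0]
--
--     return result
-- ===== SOURCE B (Python) =====
-- import re
--
-- def get_namespace(object_name):
--     # One regex pass: drop each run starting at ':' up to (not including) the next '|'.
--     return re.sub(r':[^|]*', '', object_name)
-- ===== Notes on version B (the rewrite author's own statement) =====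
-- stated objective: idiomatic
-- what changed: Replaces the split-on-'|'/per-part-split-on-':'/rejoin loop with a single regular-expression substitution (one left-to-right pass deleting each ':'-to-before-'|' run in place).
import Mathlib
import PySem

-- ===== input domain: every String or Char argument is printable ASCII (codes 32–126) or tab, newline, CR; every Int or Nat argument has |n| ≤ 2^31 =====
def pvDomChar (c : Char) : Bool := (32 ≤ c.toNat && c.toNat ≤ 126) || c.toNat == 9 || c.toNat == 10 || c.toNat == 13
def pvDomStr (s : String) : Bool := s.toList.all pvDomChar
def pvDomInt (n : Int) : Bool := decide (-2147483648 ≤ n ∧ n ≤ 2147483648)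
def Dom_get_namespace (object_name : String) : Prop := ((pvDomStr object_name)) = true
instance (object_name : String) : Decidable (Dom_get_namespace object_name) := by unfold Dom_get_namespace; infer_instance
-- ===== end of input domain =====

-- B replaces A's split/loop/rejoin with a single left-to-right pass (regex substitution in Python); idiomatic, same cost.

-- ===== PORT A =====
-- object_name.split("|") : the separator literal "|" is non-empty, so split? is always `some`
-- and part.split(":") always yields a non-empty list, so [0] (headD) never raises.
def get_namespace (object_name : String) : String :=
  let parts : List String := (PySem.Str.split? object_name "|").getD []
  (PySem.List.enumerate parts 0).foldl
    (fun result ip =>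
      (if ip.1 > 0 then result ++ "|" else result) ++
        ((PySem.Str.split? ip.2 ":").getD []).headD "")
    ""

-- ===== PORT B =====
-- Hand port of re.sub(r':[^|]*', '', object_name) (PySem has no regex): one pass over the
-- characters; after a ':' characters are dropped until the next '|' — exactly the runs the
-- regex matches, each replaced by the empty string. Exact on all strings.
def pvScanSub : List Char → Bool → List Char
  | [], _ => []
  | c :: rest, skip =>
    if skip then (if c = '|' then c :: pvScanSub rest false else pvScanSub rest true)
    else (if c = ':' then pvScanSub rest true else c :: pvScanSub rest false)

def get_namespace_alt (object_name : String) : String :=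
  String.ofList (pvScanSub object_name.toList false)

-- ===== PRECONDITION & SPEC =====
def Spec_get_namespace (object_name : String) (out : String) : Prop := out = get_namespace_alt object_name
instance (object_name : String) (out : String) : Decidable (Spec_get_namespace object_name out) := by unfold Spec_get_namespace; infer_instance

-- ===== CLAIM (what is proved, stated in full; the proofs are below) =====
def Claim_equal_get_namespace : Prop := ∀ (object_name : String), Dom_get_namespace object_name → Spec_get_namespace object_name (get_namespace object_name)

-- ===== LEMMAS AND PROOFS =====

/-- Split a character list on a single separator character (Python-style: n separators give n+1 parts). -/
def pvSplitChar (sep : Char) : List Char → List (List Char)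
  | [] => [[]]
  | c :: rest =>
    if c = sep then [] :: pvSplitChar sep rest
    else
      match pvSplitChar sep rest with
      | [] => [[c]]
      | h :: t => (c :: h) :: t

theorem pvSplitChar_ne_nil (sep : Char) (l : List Char) : pvSplitChar sep l ≠ [] := by
  cases l with
  | nil => simp [pvSplitChar]
  | cons c rest =>
    simp only [pvSplitChar]
    split_ifs
    · simp
    · cases h : pvSplitChar sep rest <;> simp

theorem pv_go_eq (sep : Char) (fuel : Nat) (l cur : List Char) (acc : List (List Char))
    (h : l.length < fuel) :
    PySem.Chars.splitOn.go [sep] fuel l cur acc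
      = acc.reverse ++ (pvSplitChar sep l).modifyHead (cur.reverse ++ ·) := by
  induction fuel generalizing l cur acc with
  | zero => omega
  | succ f ih =>
    cases l with
    | nil =>
      simp [PySem.Chars.splitOn.go, pvSplitChar]
    | cons c rest =>
      have hrest := pvSplitChar_ne_nil sep rest
      obtain ⟨hh, t, hst⟩ := List.exists_cons_of_ne_nil hrest
      by_cases hc : c = sep
      · subst hc
        have : [c].isPrefixOf (c :: rest) = true := by simp [List.isPrefixOf]
        simp only [PySem.Chars.splitOn.go, this, if_pos]
        rw [show List.drop [c].length (c :: rest) = rest from rfl]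
        rw [ih rest [] (cur.reverse :: acc) (by simpa using Nat.lt_of_succ_lt_succ h)]
        simp [pvSplitChar, hst]
      · have : [sep].isPrefixOf (c :: rest) = false := by
          simp [List.isPrefixOf]
          exact fun hx => (hc hx.symm).elim
        simp only [PySem.Chars.splitOn.go, this]
        rw [ih rest (c :: cur) acc (by simpa using Nat.lt_of_succ_lt_succ h)]
        simp [pvSplitChar, hc, hst]

theorem pv_splitOn_single (sep : Char) (l : List Char) :
    PySem.Chars.splitOn l [sep] = pvSplitChar sep l := by
  have h := pv_go_eq sep (l.length + 1) l [] [] (by omega)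
  obtain ⟨hh, t, hst⟩ := List.exists_cons_of_ne_nil (pvSplitChar_ne_nil sep l)
  simpa [PySem.Chars.splitOn, hst] using h

/-- Keep everything before the first ':' of each part. -/
def pvTok (l : List Char) : List Char := l.takeWhile (· != ':')

/-- Join parts back with '|'. -/
def pvInterp : List (List Char) → List Char
  | [] => []
  | h :: t => h ++ (t.map ('|' :: ·)).flatten

theorem pv_head_splitChar (l : List Char) :
    (pvSplitChar ':' l).headD [] = pvTok l := by
  induction l with
  | nil => simp [pvSplitChar, pvTok]
  | cons c rest ih =>
    by_cases hc : c = ':'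
    · subst hc; simp [pvSplitChar, pvTok]
    · obtain ⟨hh, t, hst⟩ := List.exists_cons_of_ne_nil (pvSplitChar_ne_nil ':' rest)
      simp only [pvSplitChar, if_neg hc, hst, List.headD_cons, pvTok] at *
      simp [hc, ← ih]

theorem pv_scan_eq (l : List Char) :
    pvScanSub l false = pvInterp ((pvSplitChar '|' l).map pvTok)
    ∧ pvScanSub l true = (((pvSplitChar '|' l).map pvTok).tail.map ('|' :: ·)).flatten := by
  induction l with
  | nil => simp [pvScanSub, pvSplitChar, pvInterp, pvTok]
  | cons c rest ih =>
    obtain ⟨ihF, ihT⟩ := ih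
    obtain ⟨hh, t, hst⟩ := List.exists_cons_of_ne_nil (pvSplitChar_ne_nil '|' rest)
    by_cases hp : c = '|'
    · subst hp
      rw [hst] at ihF
      constructor
      · simp [pvScanSub, pvSplitChar, hst, pvInterp, ihF, pvTok, List.map_map,
          Function.comp_def]
      · simp [pvScanSub, pvSplitChar, hst, ihF, pvInterp, pvTok, List.map_map,
          Function.comp_def]
    · by_cases hcol : c = ':'
      · subst hcol
        rw [hst] at ihT
        constructor
        · simp [pvScanSub, pvSplitChar, hp, hst, pvInterp, pvTok, ihT]
        · simp [pvScanSub, pvSplitChar, hp, hst, ihT]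
      · rw [hst] at ihF ihT
        constructor
        · simp [pvScanSub, hcol, hp, pvSplitChar, hst, pvInterp, pvTok,
            ihF, List.map_map, Function.comp_def]
        · simp [pvScanSub, hp, pvSplitChar, hst, ihT]

theorem pv_headTok (p : String) :
    ((PySem.Str.split? p ":").getD []).headD "" = String.ofList (pvTok p.toList) := by
  obtain ⟨hh, t, hst⟩ := List.exists_cons_of_ne_nil (pvSplitChar_ne_nil ':' p.toList)
  have h1 := pv_splitOn_single ':' p.toList
  have h2 := pv_head_splitChar p.toList
  simp [PySem.Str.split?, PySem.Chars.split?, h1, hst] at *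
  simp [← h2]

theorem pv_ofList_pipe (l : List Char) : String.ofList ('|' :: l) = "|" ++ String.ofList l := by
  have h : String.ofList ['|'] = "|" := by simp
  rw [show ('|' :: l) = ['|'] ++ l from rfl, String.ofList_append, h]

theorem pv_fold_tail (ps : List String) (n : Int) (acc : String) (hn : 1 ≤ n) :
    (PySem.List.enumerate ps n).foldl
      (fun result ip =>
        (if ip.1 > 0 then result ++ "|" else result) ++
          ((PySem.Str.split? ip.2 ":").getD []).headD "")
      acc
    = acc ++ String.ofList (((ps.map (fun p => pvTok p.toList)).map ('|' :: ·)).flatten) := by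
  induction ps generalizing n acc with
  | nil => simp [PySem.List.enumerate_nil, String.ofList_nil]
  | cons p ps ih =>
    rw [PySem.List.enumerate_cons, List.foldl_cons]
    have hpos : (n > 0) = True := by simp; omega
    rw [ih (n + 1) _ (by omega)]
    simp only [hpos, if_true, pv_headTok, List.map_cons, List.flatten_cons]
    simp [pv_ofList_pipe, String.ofList_append, String.append_assoc]

theorem pv_A_eq (s : String) :
    get_namespace s = String.ofList (pvInterp ((pvSplitChar '|' s.toList).map pvTok)) := by
  obtain ⟨hh, t, hst⟩ := List.exists_cons_of_ne_nil (pvSplitChar_ne_nil '|' s.toList)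
  have hsplit : (PySem.Str.split? s "|").getD [] = (pvSplitChar '|' s.toList).map String.ofList := by
    simp [PySem.Str.split?, PySem.Chars.split?, pv_splitOn_single]
  rw [get_namespace]
  simp only [hsplit, hst, List.map_cons, PySem.List.enumerate_cons, List.foldl_cons]
  rw [show (0 : Int) + 1 = 1 from rfl, pv_fold_tail _ 1 _ (by omega)]
  simp [pvInterp, String.ofList_append, List.map_map, Function.comp_def,
    String.toList_ofList]
  simpa [List.headD_eq_head?_getD] using pv_headTok (String.ofList hh)

-- ===== VERDICT (by name: the statement is the Claim_ definition above) =====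
theorem get_namespace_spec : Claim_equal_get_namespace := by
  intro s _
  unfold Spec_get_namespace
  rw [pv_A_eq, get_namespace_alt, (pv_scan_eq s.toList).1]
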